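-- pv_equiv track=rewrite | github.com/crsimmons/adventofcode | 2022/20/20.py | mix
-- ===== SOURCE A (Python) =====
-- def mix(A, n=1):
--     l = len(A)
--     # A is the original list
--     # B holds the indexes of the elements in A as they mix
--     B = [i for i in range(l)]
--     for _ in range(n):
--         # for each pass of the original list A:
--         #   for each (i,e) in A:
--         #       current index (ci) of e in mixed list is the index of i in B
--         #       remove i from B
--         #       calculate new index (ni) as ci + e mod the length of the list
--         #       add ni to B at index i
--         #
--         # by the end of a pass B has had one insertion per index in A
--         for i, e in enumerate(A):
--             # i is index of current element
--             # e is value of current element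
--             if e == 0:
--                 continue
--             # ci is current index of e in the mixed list
--             ci = B.index(i)
--             # remove the current index from B
--             B.pop(ci)
--             # ni is the new index of e in the mixed list
--             ni = (ci + e) % (len(A) - 1)
--             # add the new index to B before index i
--             B.insert(ni, i)
--     return [A[i] for i in B]
-- ===== SOURCE B (Python) =====
-- def mix(A, n=1):
--     l = len(A)
--     if l < 2:
--         return list(A)
--     m = l - 1
--     # pos[j] = current position of original element j (inverse of A's permutation list)
--     pos = list(range(l))
--     for _ in range(n):
--         for i, e in enumerate(A):
--             if e == 0:
--                 continue
--             ci = pos[i]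
--             ni = (ci + e) % m
--             # removing at ci and re-inserting at ni shifts exactly the positions between them
--             pos = [p - 1 if ci < p <= ni else (p + 1 if ni <= p < ci else p) for p in pos]
--             pos[i] = ni
--     out = [0] * l
--     for i, e in enumerate(A):
--         out[pos[i]] = e
--     return out
-- ===== Notes on version B (the rewrite author's own statement) =====
-- stated objective: alternative
-- what changed: B maintains the inverse permutation (element -> position) and performs each move by arithmetically shifting the affected position range, instead of A's list of indices manipulated with .index/.pop/.insert; the result is scattered directly into the output.
-- crash fix: On one-element lists with a nonzero element (and n >= 1) A raises ZeroDivisionError from '% (len(A)-1)'; B returns the list unchanged. — e.g. on mix([5], 1): A raises ZeroDivisionError, B returns [5]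
import Mathlib
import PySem

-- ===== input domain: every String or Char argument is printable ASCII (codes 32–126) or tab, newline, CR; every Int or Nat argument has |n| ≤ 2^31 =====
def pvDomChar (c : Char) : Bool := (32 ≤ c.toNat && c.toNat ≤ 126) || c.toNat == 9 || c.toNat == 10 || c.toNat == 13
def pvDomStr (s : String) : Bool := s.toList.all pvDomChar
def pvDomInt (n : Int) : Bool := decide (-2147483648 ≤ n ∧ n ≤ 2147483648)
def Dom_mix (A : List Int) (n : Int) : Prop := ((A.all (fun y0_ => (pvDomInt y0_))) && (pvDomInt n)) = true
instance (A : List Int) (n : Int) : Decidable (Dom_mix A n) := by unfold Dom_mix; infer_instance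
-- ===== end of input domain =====

-- B maintains the inverse permutation (element -> position) with arithmetic shifting instead of
-- A's list of indices with index/pop/insert; objective: alternative (same asymptotic cost).

-- ===== PORT A =====
-- one step of A's inner loop, for the pair (i, e) = enumerate(A)[i]; l = len(A)
def mixStep (l : Nat) (Bst : List Int) (ie : Int × Int) : List Int :=
  if ie.2 == 0 then Bst
  else
    -- ci = B.index(i): under A's invariant i is always in B, so .index never raises;
    -- the getD 0 default is never used on admitted inputs
    let ci : Nat := (PySem.List.index? Bst ie.1).getD 0
    -- B.pop(ci): popped value unused, so only the remaining list is kept (exact: ci < len B)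
    let B1 := Bst.eraseIdx ci
    let ni : Int := PySem.Int.mod ((ci : Int) + ie.2) ((l : Int) - 1)
    PySem.List.insert B1 ni ie.1

-- one full pass 'for i, e in enumerate(A)'
def mixPass (A : List Int) (Bst : List Int) : List Int :=
  (PySem.List.enumerate A 0).foldl (mixStep A.length) Bst

def mix (A : List Int) (n : Int) : List Int :=
  -- B = [i for i in range(l)]; for _ in range(n): one pass; return [A[i] for i in B]
  (((mixPass A)^[n.toNat]) (PySem.List.pyRange 0 (A.length : Int) 1)).map
    (fun i => PySem.List.pyGetD A i 0)

-- ===== PORT B =====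
-- one step of Source B's inner loop; m = l - 1
def altStep (m : Int) (pos : List Int) (ie : Int × Int) : List Int :=
  if ie.2 == 0 then pos
  else
    let ci := PySem.List.pyGetD pos ie.1 0
    let ni := PySem.Int.mod (ci + ie.2) m
    let pos' := pos.map (fun p =>
      if ci < p ∧ p ≤ ni then p - 1 else if ni ≤ p ∧ p < ci then p + 1 else p)
    PySem.List.pySetD pos' ie.1 ni

def altPass (A : List Int) (pos : List Int) : List Int :=
  (PySem.List.enumerate A 0).foldl (altStep ((A.length : Int) - 1)) pos

-- out[pos[i]] = e for (i, e) in enumerate(A)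
def altScatter (pos : List Int) (out : List Int) (ie : Int × Int) : List Int :=
  PySem.List.pySetD out (PySem.List.pyGetD pos ie.1 0) ie.2

def mix_alt (A : List Int) (n : Int) : List Int :=
  if A.length < 2 then A
  else
    let pos := ((altPass A)^[n.toNat]) (PySem.List.pyRange 0 (A.length : Int) 1)
    (PySem.List.enumerate A 0).foldl (altScatter pos) (List.replicate A.length (0 : Int))

-- ===== PRECONDITION & SPEC =====
-- Pre_ excludes exactly the inputs where A raises ZeroDivisionError ('% (len(A)-1)' with
-- len(A) = 1 and a nonzero element to move); everywhere else A returns normally.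
def Pre_mix (A : List Int) (n : Int) : Prop := ¬ (A.length = 1 ∧ 0 < n ∧ A ≠ [0])
instance (A : List Int) (n : Int) : Decidable (Pre_mix A n) := by unfold Pre_mix; infer_instance
def pvWitness_mix : List Int × Int := ([3, -2, 0, 7, 1], 2)

-- A raises ZeroDivisionError on one-element lists with a nonzero element (and n ≥ 1); B returns the list unchanged.
def Raises_mix (A : List Int) (n : Int) : Prop := A.length = 1 ∧ 0 < n ∧ A ≠ [0]
instance (A : List Int) (n : Int) : Decidable (Raises_mix A n) := by unfold Raises_mix; infer_instance
def pvRaiseWitness_mix : List Int × Int := ([5], 1)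
def pvRaiseWitnessOut_mix : List Int := [5]

def Spec_mix (A : List Int) (n : Int) (out : List Int) : Prop := out = mix_alt A n
instance (A : List Int) (n : Int) (out : List Int) : Decidable (Spec_mix A n out) := by unfold Spec_mix; infer_instance

-- ===== CLAIM (what is proved, stated in full; the proofs are below) =====
def Claim_equal_mix : Prop := ∀ (A : List Int) (n : Int), Dom_mix A n → Pre_mix A n → Spec_mix A n (mix A n)
def Claim_raises_mix : Prop := (∀ (A : List Int) (n : Int), Dom_mix A n → Raises_mix A n → ¬ Pre_mix A n) ∧ (Dom_mix (pvRaiseWitness_mix.1) (pvRaiseWitness_mix.2) ∧ Raises_mix (pvRaiseWitness_mix.1) (pvRaiseWitness_mix.2) ∧ mix_alt (pvRaiseWitness_mix.1) (pvRaiseWitness_mix.2) = pvRaiseWitnessOut_mix)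

-- ===== LEMMAS AND PROOFS =====

-- the invariant tying A's index list Bst to B's position list pos
def InvBP (l : Nat) (Bst pos : List Int) : Prop :=
  Bst.Perm (PySem.List.pyRange 0 (l : Int) 1) ∧ pos.length = l ∧
  ∀ j : Nat, j < l → pos.getD j 0 = (Bst.idxOf ((j : Int)) : Int)

theorem invBP_length {l : Nat} {Bst pos : List Int} (h : InvBP l Bst pos) : Bst.length = l := by
  have := h.1.length_eq
  simpa [PySem.List.length_pyRange_one] using this

theorem invBP_nodup {l : Nat} {Bst pos : List Int} (h : InvBP l Bst pos) : Bst.Nodup := by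
  exact h.1.nodup_iff.mpr (PySem.List.nodup_pyRange_one 0 (l : Int) )

theorem invBP_mem {l : Nat} {Bst pos : List Int} (h : InvBP l Bst pos) {j : Nat} (hj : j < l) :
    ((j : Int)) ∈ Bst := by
  rw [h.1.mem_iff, PySem.List.mem_pyRange_one]
  constructor <;> omega

theorem invBP_getElem {l : Nat} {Bst pos : List Int} (h : InvBP l Bst pos) {q : Nat}
    (hq : q < Bst.length) : ∃ j : Nat, j < l ∧ Bst[q] = (j : Int) := by
  have hmem : Bst[q] ∈ Bst := List.getElem_mem hq
  rw [h.1.mem_iff, PySem.List.mem_pyRange_one] at hmem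
  exact ⟨Bst[q].toNat, by omega, by omega⟩


theorem idxOf_eq_of_getElem {L : List Int} (hnd : L.Nodup) {q : Nat} (hq : q < L.length)
    {x : Int} (hx : L[q] = x) : L.idxOf x = q := by
  subst hx; exact hnd.idxOf_getElem q hq

theorem insertIdx_eq_take_cons_drop {l : List Int} {n : Nat} (x : Int) (h : n ≤ l.length) :
    l.insertIdx n x = l.take n ++ x :: l.drop n := by
  induction l generalizing n with
  | nil => simp at h; simp [h, List.insertIdx]
  | cons a t ih =>
    cases n with
    | zero => simp [List.insertIdx]
    | succ m =>
      simp only [List.insertIdx_succ_cons, List.take_succ_cons, List.drop_succ_cons,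
        List.cons_append]
      exact congrArg (a :: ·) (ih (by simpa using h))


theorem idxOf_insert_erase {Bst : List Int} (hnd : Bst.Nodup) {ci niN : Nat}
    (hci : ci < Bst.length) (hni : niN ≤ Bst.length - 1) {j : Int} (hj : j ∈ Bst)
    (hne : j ≠ Bst[ci]) :
    ((Bst.eraseIdx ci).insertIdx niN Bst[ci]).idxOf j =
      (if Bst.idxOf j < ci then (if Bst.idxOf j < niN then Bst.idxOf j else Bst.idxOf j + 1)
       else (if Bst.idxOf j - 1 < niN then Bst.idxOf j - 1 else Bst.idxOf j)) := by
  have hClen : (Bst.eraseIdx ci).length = Bst.length - 1 := by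
    simp [List.length_eraseIdx, hci]
  have hniNle : niN ≤ (Bst.eraseIdx ci).length := by omega
  have hB'len : ((Bst.eraseIdx ci).insertIdx niN Bst[ci]).length = Bst.length := by
    rw [List.length_insertIdx_of_le_length hniNle]; omega
  have hB'perm : ((Bst.eraseIdx ci).insertIdx niN Bst[ci]).Perm Bst :=
    (List.perm_insertIdx _ _ hniNle).trans (List.getElem_cons_eraseIdx_perm hci)
  have hB'nd := hB'perm.nodup_iff.mpr hnd
  set p := Bst.idxOf j with hp
  have hplt : p < Bst.length := List.idxOf_lt_length_iff.mpr hj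
  have hBp : Bst[p] = j := List.getElem_idxOf _
  have hpne : p ≠ ci := by
    intro hEq
    exact hne (by rw [← hBp]; congr 1)
  rcases Nat.lt_or_ge p ci with hlt | hge
  · have hC : (Bst.eraseIdx ci)[p]'(by omega) = j := by
      rw [List.getElem_eraseIdx_of_lt (by omega) hlt]; exact hBp
    rcases Nat.lt_or_ge p niN with h2 | h2
    · have hq : ((Bst.eraseIdx ci).insertIdx niN Bst[ci])[p]'(by omega) = j := by
        rw [List.getElem_insertIdx_of_lt h2]; exact hC
      rw [← hq, hB'nd.idxOf_getElem p (by omega)]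
      simp [hlt, h2]
    · have hk : niN + (p - niN) = p := by omega
      have h3 := List.getElem_insertIdx_add_succ (Bst.eraseIdx ci) Bst[ci] niN (p - niN) (by omega)
      simp only [hk] at h3
      have hq : ((Bst.eraseIdx ci).insertIdx niN Bst[ci])[p + 1]'(by omega) = j := by
        rw [h3]; exact hC
      rw [← hq, hB'nd.idxOf_getElem (p + 1) (by omega)]
      simp [hlt, show ¬ p < niN by omega]
  · have hge' : ci < p := by omega
    have hC : (Bst.eraseIdx ci)[p - 1]'(by omega) = j := by
      rw [List.getElem_eraseIdx_of_ge (by omega) (by omega : ci ≤ p - 1)]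
      have hpp : p - 1 + 1 = p := by omega
      simp only [hpp]; exact hBp
    rcases Nat.lt_or_ge (p - 1) niN with h2 | h2
    · have hq : ((Bst.eraseIdx ci).insertIdx niN Bst[ci])[p - 1]'(by omega) = j := by
        rw [List.getElem_insertIdx_of_lt h2]; exact hC
      rw [← hq, hB'nd.idxOf_getElem (p - 1) (by omega)]
      simp [show ¬ p < ci by omega, h2]
    · have hk : niN + (p - 1 - niN) = p - 1 := by omega
      have hpp : p - 1 + 1 = p := by omega
      have h3 := List.getElem_insertIdx_add_succ (Bst.eraseIdx ci) Bst[ci] niN (p - 1 - niN) (by omega)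
      simp only [hk, hpp] at h3
      have hq : ((Bst.eraseIdx ci).insertIdx niN Bst[ci])[p]'(by omega) = j := by
        rw [h3]; exact hC
      rw [← hq, hB'nd.idxOf_getElem p (by omega)]
      simp [show ¬ p < ci by omega, show ¬ p - 1 < niN by omega]

theorem step_inv {l : Nat} (hl : 2 ≤ l) {Bst pos : List Int} (h : InvBP l Bst pos)
    {i : Nat} (hi : i < l) (e : Int) :
    InvBP l (mixStep l Bst ((i : Int), e)) (altStep ((l : Int) - 1) pos ((i : Int), e)) := by
  by_cases he : e = 0
  · simpa [mixStep, altStep, he] using h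
  obtain ⟨hperm, hplen, hpos⟩ := h
  have hInv : InvBP l Bst pos := ⟨hperm, hplen, hpos⟩
  have hBlen : Bst.length = l := invBP_length hInv
  have hnd : Bst.Nodup := invBP_nodup hInv
  have hmemi : ((i : Int)) ∈ Bst := invBP_mem hInv hi
  obtain ⟨ci, hci⟩ : ∃ k, PySem.List.index? Bst ((i : Int)) = some k :=
    Option.isSome_iff_exists.mp (((PySem.List.index?_isSome_iff Bst _).mpr) hmemi)
  obtain ⟨hcilt, hBci, -⟩ := PySem.List.getElem_of_index?_eq_some hci
  have hidx : Bst.idxOf ((i : Int)) = ci := by rw [← hBci]; exact hnd.idxOf_getElem ci hcilt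
  have hClen : (Bst.eraseIdx ci).length = l - 1 := by
    rw [List.length_eraseIdx]; simp [hBlen]; omega
  set niI := PySem.Int.mod ((ci : Int) + e) ((l : Int) - 1) with hniI
  have hl1 : (0 : Int) < (l : Int) - 1 := by omega
  have hni0 : 0 ≤ niI := PySem.Int.mod_nonneg _ hl1
  have hniu : niI < (l : Int) - 1 := PySem.Int.mod_lt _ hl1
  have hcast : ((niI.toNat : Int)) = niI := Int.toNat_of_nonneg hni0
  have hniNle : niI.toNat ≤ (Bst.eraseIdx ci).length := by omega
  -- A's step is insertIdx into the erased list
  have hA : mixStep l Bst ((i : Int), e) = (Bst.eraseIdx ci).insertIdx niI.toNat ((i : Int)) := by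
    simp only [mixStep]
    rw [if_neg (show ¬ ((e == 0) = true) by simpa using he)]
    simp only [hci, Option.getD_some, ← hniI]
    conv_lhs => rw [show niI = ((niI.toNat : Int)) from hcast.symm]
    rw [PySem.List.insert_natCast _ _ _ hniNle, insertIdx_eq_take_cons_drop _ hniNle]
  -- B's step is the arithmetic shift followed by the set
  have hciPos : pos.getD i 0 = ((ci : Int)) := by rw [hpos i hi, hidx]
  have hB : altStep ((l : Int) - 1) pos ((i : Int), e) =
      (pos.map (fun p => if (ci : Int) < p ∧ p ≤ niI then p - 1
        else if niI ≤ p ∧ p < (ci : Int) then p + 1 else p)).set i niI := by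
    simp only [altStep]
    rw [if_neg (show ¬ ((e == 0) = true) by simpa using he)]
    simp only [PySem.List.pyGetD_natCast, hciPos, PySem.List.pySetD_natCast, ← hniI]
  rw [hA, hB]
  have hmlen : (pos.map (fun p => if (ci : Int) < p ∧ p ≤ niI then p - 1
      else if niI ≤ p ∧ p < (ci : Int) then p + 1 else p)).length = l := by simp [hplen]
  -- facts about the new A-side list
  have hB'len : ((Bst.eraseIdx ci).insertIdx niI.toNat ((i : Int))).length = l := by
    rw [List.length_insertIdx_of_le_length hniNle]; omega
  have hB'perm : ((Bst.eraseIdx ci).insertIdx niI.toNat ((i : Int))).Perm Bst := by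
    refine (List.perm_insertIdx _ _ hniNle).trans ?_
    rw [← hBci]; exact List.getElem_cons_eraseIdx_perm hcilt
  have hB'nd : ((Bst.eraseIdx ci).insertIdx niI.toNat ((i : Int))).Nodup :=
    hB'perm.nodup_iff.mpr hnd
  have hB'i : ((Bst.eraseIdx ci).insertIdx niI.toNat ((i : Int))).idxOf ((i : Int)) = niI.toNat := by
    have hni' : niI.toNat < ((Bst.eraseIdx ci).insertIdx niI.toNat ((i : Int))).length := by omega
    exact idxOf_eq_of_getElem hB'nd hni' (by rw [List.getElem_insertIdx_self])
  refine ⟨hB'perm.trans hperm, by simp [hmlen], ?_⟩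
  intro j hj
  by_cases hji : j = i
  · subst hji
    rw [List.getD_eq_getElem _ _ (by simp [hmlen]; omega), List.getElem_set_self (by simp [List.length_set, hmlen]; omega), hB'i,
      hcast]
  · have hjne : ((j : Int)) ≠ Bst[ci] := by rw [hBci]; intro hEq; exact hji (by exact_mod_cast hEq)
    have hmemj : ((j : Int)) ∈ Bst := invBP_mem hInv hj
    have hgd : ((pos.map (fun p => if (ci : Int) < p ∧ p ≤ niI then p - 1
        else if niI ≤ p ∧ p < (ci : Int) then p + 1 else p)).set i niI).getD j 0 =
        (fun p => if (ci : Int) < p ∧ p ≤ niI then p - 1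
        else if niI ≤ p ∧ p < (ci : Int) then p + 1 else p) (pos.getD j 0) := by
      rw [List.getD_eq_getElem _ _ (by simp [hmlen]; omega),
        List.getElem_set_ne (by omega) , List.getElem_map,
        List.getD_eq_getElem _ _ (by omega)]
    rw [hgd, hpos j hj]
    have hBcast : Bst[ci] = ((i : Int)) := hBci
    rw [show ((i : Int)) = Bst[ci] from hBci.symm,
      idxOf_insert_erase hnd hcilt (by omega) hmemj hjne]
    set p := Bst.idxOf ((j : Int)) with hpdef
    have hplt' : p < l := by
      have := List.idxOf_lt_length_iff.mpr hmemj; omega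
    have hpne : p ≠ ci := by
      intro hEq
      apply hjne
      have hBp : Bst[p]'(by omega) = ((j : Int)) := List.getElem_idxOf _
      rw [← hBp]; congr 1
    simp only []
    split_ifs <;> push_cast <;> omega

theorem pass_inv {A : List Int} (hl : 2 ≤ A.length) {Bst pos : List Int}
    (h : InvBP A.length Bst pos) : InvBP A.length (mixPass A Bst) (altPass A pos) := by
  unfold mixPass altPass
  have hgen : ∀ (L : List (Int × Int)), (∀ p ∈ L, ∃ k : Nat, k < A.length ∧ p.1 = (k : Int)) →
      ∀ Bst pos, InvBP A.length Bst pos →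
      InvBP A.length (L.foldl (mixStep A.length) Bst)
        (L.foldl (altStep ((A.length : Int) - 1)) pos) := by
    intro L
    induction L with
    | nil => intro _ a b hab; simpa using hab
    | cons x t ih =>
      intro hP a b hab
      simp only [List.foldl_cons]
      refine ih (fun p hp => hP p (List.mem_cons_of_mem _ hp)) _ _ ?_
      obtain ⟨k, hk, hx1⟩ := hP x (List.mem_cons_self ..)
      have hx : x = ((k : Int), x.2) := by cases x; simp_all
      rw [hx]
      exact step_inv hl hab hk x.2
  refine hgen _ ?_ _ _ h
  intro p hp
  rw [PySem.List.mem_enumerate_iff] at hp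
  obtain ⟨k, hk, rfl⟩ := hp
  exact ⟨k, hk, by simp⟩

theorem init_inv (l : Nat) :
    InvBP l (PySem.List.pyRange 0 (l : Int) 1) (PySem.List.pyRange 0 (l : Int) 1) := by
  have hlen : (PySem.List.pyRange 0 (l : Int) 1).length = l := by
    simp [PySem.List.length_pyRange_one]
  refine ⟨List.Perm.refl _, hlen, fun j hj => ?_⟩
  have hj' : j < (PySem.List.pyRange 0 (l : Int) 1).length := by omega
  have hg : (PySem.List.pyRange 0 (l : Int) 1)[j] = ((j : Int)) := by
    rw [PySem.List.getElem_pyRange_one]; simp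
  rw [List.getD_eq_getElem _ _ hj', hg,
    idxOf_eq_of_getElem (PySem.List.nodup_pyRange_one 0 (l : Int)) hj' hg]

theorem iter_inv {A : List Int} (hl : 2 ≤ A.length) (k : Nat) :
    InvBP A.length (((mixPass A)^[k]) (PySem.List.pyRange 0 (A.length : Int) 1))
      (((altPass A)^[k]) (PySem.List.pyRange 0 (A.length : Int) 1)) := by
  induction k with
  | zero => simpa using init_inv A.length
  | succ k ih =>
    rw [Function.iterate_succ_apply', Function.iterate_succ_apply']
    exact pass_inv hl ih

theorem scatter_eq {A : List Int} {Bst pos : List Int} (h : InvBP A.length Bst pos) :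
    (PySem.List.enumerate A 0).foldl (altScatter pos) (List.replicate A.length (0 : Int)) =
      Bst.map (fun i => PySem.List.pyGetD A i 0) := by
  have hBlen : Bst.length = A.length := invBP_length h
  have hnd : Bst.Nodup := invBP_nodup h
  rw [PySem.List.enumerate_eq_map_pyRange A 0, List.foldl_map, PySem.List.len_eq,
    PySem.List.pyRange_zero_nat, List.foldl_map]
  have main : ∀ t, t ≤ A.length →
      ((List.range t).foldl
        (fun out k => altScatter pos out (((k : Nat) : Int), PySem.List.pyGetD A ((k : Nat) : Int) 0))
        (List.replicate A.length (0 : Int))).length = A.length ∧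
      ∀ q, q < A.length →
        ((List.range t).foldl
          (fun out k => altScatter pos out (((k : Nat) : Int), PySem.List.pyGetD A ((k : Nat) : Int) 0))
          (List.replicate A.length (0 : Int))).getD q 0 =
        if (Bst.getD q 0).toNat < t then PySem.List.pyGetD A (Bst.getD q 0) 0 else 0 := by
    intro t
    induction t with
    | zero => simp
    | succ t ih =>
      intro ht
      obtain ⟨ihlen, ihval⟩ := ih (by omega)
      rw [List.range_succ, List.foldl_append, List.foldl_cons, List.foldl_nil]
      have htl : t < A.length := by omega
      have hposidx : PySem.List.pyGetD pos ((t : Int)) 0 = ((Bst.idxOf ((t : Int)) : Nat) : Int) := by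
        rw [PySem.List.pyGetD_natCast, h.2.2 t htl]
      have hscat : altScatter pos
          ((List.range t).foldl
            (fun out k => altScatter pos out (((k : Nat) : Int), PySem.List.pyGetD A ((k : Nat) : Int) 0))
            (List.replicate A.length (0 : Int)))
          (((t : Nat) : Int), PySem.List.pyGetD A ((t : Nat) : Int) 0) =
          ((List.range t).foldl
            (fun out k => altScatter pos out (((k : Nat) : Int), PySem.List.pyGetD A ((k : Nat) : Int) 0))
            (List.replicate A.length (0 : Int))).set (Bst.idxOf ((t : Int)))
            (PySem.List.pyGetD A ((t : Int)) 0) := by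
        rw [altScatter, hposidx, PySem.List.pySetD_natCast]
      rw [hscat]
      have hmemt : ((t : Int)) ∈ Bst := invBP_mem h htl
      have hidxlt : Bst.idxOf ((t : Int)) < A.length := by
        have := List.idxOf_lt_length_iff.mpr hmemt; omega
      refine ⟨by rw [List.length_set]; exact ihlen, fun q hq => ?_⟩
      have hqB : q < Bst.length := by omega
      obtain ⟨j, hjl, hBq⟩ := invBP_getElem h hqB
      have hBgd : Bst.getD q 0 = ((j : Int)) := by
        rw [List.getD_eq_getElem _ _ hqB, hBq]
      by_cases hqt : q = Bst.idxOf ((t : Int))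
      · subst hqt
        have hBt : Bst.getD (Bst.idxOf ((t : Int))) 0 = ((t : Int)) := by
          rw [List.getD_eq_getElem _ _ (by omega)]
          exact List.getElem_idxOf _
        rw [List.getD_eq_getElem _ _ (by rw [List.length_set, ihlen]; omega),
          List.getElem_set_self (by rw [List.length_set, ihlen]; omega), hBt]
        simp
      · rw [List.getD_eq_getElem _ _ (by rw [List.length_set, ihlen]; omega),
          List.getElem_set_ne (by omega), ← List.getD_eq_getElem _ 0 (by omega), ihval q hq]
        have hjt : j ≠ t := by
          intro hEq
          apply hqt
          apply (idxOf_eq_of_getElem hnd hqB hBq).symm.trans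
          rw [hEq]
        rw [hBgd]
        simp only [Int.toNat_natCast]
        rcases Nat.lt_or_ge j t with hlt2 | hge2
        · rw [if_pos hlt2, if_pos (show j < t + 1 by omega)]
        · rw [if_neg (show ¬ j < t by omega), if_neg (show ¬ j < t + 1 by omega)]
  obtain ⟨hlen, hval⟩ := main A.length le_rfl
  apply List.ext_getElem (by rw [hlen, List.length_map, hBlen])
  intro q hq1 hq2
  have hqB : q < Bst.length := by rw [List.length_map] at hq2; exact hq2
  have hqA : q < A.length := by omega
  obtain ⟨j, hjl, hBq⟩ := invBP_getElem h hqB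
  rw [List.getElem_map, ← List.getD_eq_getElem _ 0 hq1, hval q hqA]
  have hBgd : Bst.getD q 0 = ((j : Int)) := by
    rw [List.getD_eq_getElem _ _ hqB, hBq]
  rw [hBgd, hBq]
  simp [hjl]

-- ===== VERDICT (by name: the statement is the Claim_ definition above) =====
theorem mix_spec : Claim_equal_mix := by
  intro A n hdom hpre
  show mix A n = mix_alt A n
  rcases Nat.lt_or_ge A.length 2 with hsmall | hbig
  · rcases A with _ | ⟨a, _ | ⟨b, t⟩⟩
    · -- A = []
      unfold mix mix_alt
      rw [if_pos (by simp)]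
      have h0 : PySem.List.pyRange 0 (((([] : List Int)).length : Int)) 1 = [] := by
        simp [PySem.List.pyRange_one_eq_nil]
      rw [h0, Function.iterate_fixed (by rfl) n.toNat]
      simp
    · -- A = [a]
      unfold mix mix_alt
      rw [if_pos (by simp)]
      have h1 : PySem.List.pyRange 0 ((([a] : List Int).length : Int)) 1 = [0] := by
        simp [PySem.List.pyRange_one, List.range_succ]
      by_cases hn : n ≤ 0
      · rw [h1, show n.toNat = 0 from Int.toNat_of_nonpos hn]
        simp [PySem.List.pyGetD_zero_cons]
      · have ha : a = 0 := by
          by_contra hne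
          exact hpre ⟨rfl, by omega, by simp [hne]⟩
        subst ha
        rw [h1, Function.iterate_fixed (by rfl) n.toNat]
        simp [PySem.List.pyGetD_zero_cons]
    · simp at hsmall
  · unfold mix mix_alt
    rw [if_neg (by omega)]
    exact (scatter_eq (iter_inv hbig n.toNat)).symm

theorem mix_raises : Claim_raises_mix := by
  unfold Claim_raises_mix
  exact ⟨fun A n _ hr hp => hp hr, by decide⟩

-- deliberate witness self-check (of mix_raises): the raise witness lies in Raises_mix and B's port returns the stated value there
theorem pvRaiseWitness_ok :
    Raises_mix pvRaiseWitness_mix.1 pvRaiseWitness_mix.2 ∧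
      mix_alt pvRaiseWitness_mix.1 pvRaiseWitness_mix.2 = pvRaiseWitnessOut_mix := by
  have h := mix_raises
  unfold Claim_raises_mix at h
  exact ⟨h.2.2.1, h.2.2.2⟩
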